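/-
  THE SEGMENTS OF `DGifGetImageDesc` (dgif_lib.c:430-479; 115 instructions at 109460H; NO protected frame: four pushes and `sub rsp, 8`;
  contract: Gif/Spec/Desc.lean `DGifGetImageDesc.spec`; design/CONTRACTS.md entry 12; design/units/DGifGetImageDesc.tsv).

      unit  from      to (exits)               what it walks
      1     109460H   1094B5H | 10949AH        the four pushes, `sub rsp, 8`, `rbx = gif`; IS_READABLE (l.434; the arm l.436 is walked);
                                               `DGifGetImageHeader(gif)` (l.440), `ebp` = its result; GIF_ERROR: to the exit      (22 instructions)
      2     1094B5H   109503H | 1095E6H | 10949AH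
                                               `if (GifFile->SavedImages)` (l.444): NULL: to 1095E6H; otherwise
                                               `openbsd_reallocarray(SavedImages, ImageCount + 1, 56)` (l.445): IN PLACE (`Hc.resize`),
                                               MOVED (`(Hc.push …).release old`), FAILED (l.448-451, 1095D1H: `Error`, `ebp = 0`);
                                               the store of the new pointer (l.452)                                         (23)
      3     1095E6H   109503H | 10949AH        the first array: `malloc(56)` (l.455), the store of the result to `gif.SavedImages`
                                               (l.454), NULL: `Error` (l.456, 109609H), `ebp = 0`                           (12)
      4     109503H   109535H                  `sp = &SavedImages[ImageCount]` (l.461: `rbp = arr + 56 · ImageCount`),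
                                               `memcpy(&sp->ImageDesc, &gif->Image, 32)` (l.462) into the UNCOUNTED slot (a loose `tail`
                                               window of the array)                                                        (11)
      5     109535H   109583H | 10949AH        `if (gif->Image.ColorMap != NULL)` (l.463): the deep copy
                                               `GifMakeMapObject(ColorCount, Colors)` (l.464-466), the store of the result to
                                               `sp->ImageDesc.ColorMap`; NULL: `Error` (l.468, 10961EH), `ebp = 0`: the function returns
                                               WITHOUT counting the slot                                                   (24)
      6     109583H   10949AH                  the three NULL stores (l.472-474), `ImageCount++` (l.476) which COUNTS the slot
                                               (`SavedAt.snoc`), `ebp = 1`                                                  (16)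
      E     10949AH   ret                      the shared exit: `eax = ebp`, `add rsp, 8`, four pops, `ret`                  (7)
      COMPOSITION                              `compose`, proved below: `ReachVia.trans` along the segments

  THE GHOSTS THAT CHANGE: `Hc` (the present heap) and `Fc` (the present forest) are parameters of every assertion besides the entry's
  `H`, `F`; `SameRegion H Hc` and `F.SameButIcmSaved Fc` relate them. `Fc.imgs = F.imgs` holds at every cut before the exit: a slot
  is counted by the LAST store of segment 6 only. THE COPY OF THE LOCAL MAP is live in `Hc` but NOT in `Fc` between its allocation
  (109565H) and the count (1095C4H): at 109583H it is carried as `Owns Hc (Map.objs cm ++ Fc.owned)` next to `GifOK Hc Fc`.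
-/
import Gif.Spec.Desc
import Gif.LabelsAt
namespace Gif.Spec
open X86 X86.User Asan ProgX.Base ProgX.Base.Spec

namespace DGifGetImageDesc

/-- **INSIDE `DGifGetImageDesc`**, at the address `cut`, inside the call that was entered at the state `e` (return address `ret`) with
the function's precondition for the heap `H` and the forest `F`; `Hc` and `Fc` are the PRESENT heap and forest. Four registers saved
(`r13 r12 rbp rbx` in push order), `rsp = RA − 40`, `rbx = gif`, `r14 r15` never touched; the function has no protected frame: the
active frames are the entry's; the heap's invariant and the state invariant hold for `Hc`, `Fc`; nothing was written but the
function's stack and the contract's windows; the reader did not go back. `rbp r12 r13` are locals: what they hold is said by the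
assertion of each cut. -/
structure At (cut : Word) (H : Heap) (rest : List Obj) (frames : List (Nat × FrameLayout)) (F : Forest) (R : Rd)
    (Hc : Heap) (Fc : Forest) (u₀ e : State) (ret : Word) (v : State) : Prop where
  /-- the function was entered at `e` … -/
  entry : AtEntry (conv u₀) Gif.L.DGifGetImageDesc.entry (DGifGetImageDesc.spec H rest frames F R).frame ret e
  /-- … with its precondition: `Env H rest frames F R e` (of the ENTRY memory: `HeapPre`'s region and text clauses and `Ctx` are
  memory-independent and are taken from here) and `rdi = gif` -/
  pre : (DGifGetImageDesc.spec H rest frames F R).pre e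
  rip : v.rip = cut
  /-- four pushes and `sub rsp, 8` below the return address -/
  rsp : v.reg .rsp = e.reg .rsp - 40
  /-- `mov rbx, rdi` (10946AH): `gif` -/
  rbx : v.reg .rbx = e.reg .rdi
  /-- not used by the function -/
  r14 : v.reg .r14 = e.reg .r14
  r15 : v.reg .r15 = e.reg .r15
  /-- the saved registers, in push order -/
  slot_r13 : v.mem.readLE (e.reg .rsp - 8) 8 = (e.reg .r13).toNat
  slot_r12 : v.mem.readLE (e.reg .rsp - 16) 8 = (e.reg .r12).toNat
  slot_rbp : v.mem.readLE (e.reg .rsp - 24) 8 = (e.reg .rbp).toNat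
  slot_rbx : v.mem.readLE (e.reg .rsp - 32) 8 = (e.reg .rbx).toNat
  /-- the return address is still in its slot (`ret` at 1094A6H pops it): no store of the function reaches `[RA, RA + 8)` — the
  stack windows end at `RA`, the heap's region and the shadow lie at or above 800000H, the cursor is a stack object of a caller's
  frame -/
  slot_ra : UInt64.ofNat (v.mem.readLE (e.reg .rsp) 8) = ret
  /-- the heap's invariant for the PRESENT heap, the entry's frames, the clean stack ending at the present stack pointer -/
  inv : HeapInv Hc rest frames ((e.reg .rsp).toNat - 40) v.mem
  /-- the present heap is at the place of the entry's (what `HeapPre` of a callee and `Back2.region` ask) -/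
  region : SameRegion H Hc
  /-- the present forest differs from the entry's in `icm` and `saved` only (the post's clause) -/
  forest : F.SameButIcmSaved Fc
  /-- THE STATE INVARIANT, whole: no pointer dangles at a cut -/
  ok : GifOK Hc Fc R v.mem
  /-- the reader did not go back (`Back2.rem`) -/
  rem : rem R v.mem ≤ rem R e.mem
  /-- nothing was written but the function's stack (the contract's 496 bytes) and the contract's windows (the heap's region, its
  shadow, the cursor's `cur`) -/
  same : Mem.SameExcept
    [⟨(e.reg .rsp).toNat - 496, (e.reg .rsp).toNat⟩,
     ⟨0x800000, 0x1000020⟩,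
     ⟨R.cur, R.cur + 8⟩] e.mem v.mem
  code : (conv u₀).code.In v.mem
  abi : (conv u₀).inv v

/-- **BEHIND A SUCCESSFUL DGifGetImageHeader, BEFORE THE SLOT IS COUNTED**: `At`, the counted images are the entry's, and the LZW field
ranges hold (DGifGetImageHeader's success clause; no store of this function goes to `[pv + 8, pv + 48)`). Used as it is at
  1094B5H (the return of DGifGetImageHeader with GIF_OK, behind `test eax, eax ; je`: `Fc.saved = F.saved`, `Fc.icm` any). -/
structure Mid (cut : Word) (H : Heap) (rest : List Obj) (frames : List (Nat × FrameLayout)) (F : Forest) (R : Rd)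
    (Hc : Heap) (Fc : Forest) (u₀ e : State) (ret : Word) (v : State) : Prop where
  at_ : At cut H rest frames F R Hc Fc u₀ e ret v
  /-- no slot was counted yet -/
  imgs : Fc.imgs = F.imgs
  /-- the success clause of DGifGetImageHeader -/
  lz : LZOK v.mem F.pv

/-- **THERE IS NO ARRAY YET** (at 1095E6H `mov edi, 0x38`, the target of `je` at 1094C5H: `gif.SavedImages = 0`): `Mid`, and the
forest has no array (a live array's base is not 0: `Owns.inside`). -/
structure NoArray (H : Heap) (rest : List Obj) (frames : List (Nat × FrameLayout)) (F : Forest) (R : Rd)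
    (Hc : Heap) (Fc : Forest) (u₀ e : State) (ret : Word) (v : State) : Prop where
  mid : Mid Gif.L.DGifGetImageDesc.at_1095e6 H rest frames F R Hc Fc u₀ e ret v
  nosaved : Fc.saved = none

/-- **THE ARRAY HAS ROOM FOR ONE MORE SLOT** (at 109503H `mov rbp, [rbx+0x48]`, the joint of the `reallocarray` path and the `malloc`
path, behind the store of the new pointer to `gif.SavedImages`): `Mid` for the NEW heap and forest, whose array `s` — grown in
place, moved, or the first one (`cap = 1`, no image) — has `length + 1 ≤ cap`: the slot `[arr + 56 · length, + 56)` lies inside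
the live object `(s.arr, 56 · s.cap)` and is NOT counted (a loose `tail` window). `rbp` is dead (re-loaded from the field). -/
structure Grown (H : Heap) (rest : List Obj) (frames : List (Nat × FrameLayout)) (F : Forest) (R : Rd)
    (Hc : Heap) (Fc : Forest) (u₀ e : State) (ret : Word) (v : State) : Prop where
  mid : Mid Gif.L.DGifGetImageDesc.at_109503 H rest frames F R Hc Fc u₀ e ret v
  /-- the array, with room for the uncounted slot -/
  room : ∃ s : Saved, Fc.saved = some s ∧ s.imgs.length + 1 ≤ s.cap

/-- **THE DESCRIPTOR WAS COPIED INTO THE UNCOUNTED SLOT** (at 109535H `lea rdi, [rbx+0x40]`, the return of `memcpy` l.462): `Mid`, the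
array with room, `rbp = sp = arr + 56 · length` (l.461), and the slot's `ImageDesc.ColorMap` field (`sp + 24`) holds what
`gif.Image.ColorMap` holds (bytes 24 … 32 of the 32 copied): 0 if there is no local map (then the slot's map is `none` with no
further store), the ALIAS `icm.obj` otherwise (overwritten at 109576H by the deep copy or by NULL). -/
structure AfterCopy (H : Heap) (rest : List Obj) (frames : List (Nat × FrameLayout)) (F : Forest) (R : Rd)
    (Hc : Heap) (Fc : Forest) (u₀ e : State) (ret : Word) (v : State) : Prop where
  mid : Mid Gif.L.DGifGetImageDesc.at_109535 H rest frames F R Hc Fc u₀ e ret v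
  /-- the array with room, `sp` in `rbp`, the copied pointer field -/
  slot : ∃ s : Saved, Fc.saved = some s ∧ s.imgs.length + 1 ≤ s.cap ∧
    (v.reg .rbp).toNat = s.arr + 56 * s.imgs.length ∧
    SavedImage.ImageDesc.ColorMap v.mem (s.arr + 56 * s.imgs.length) = GifFileType.Image.ColorMap v.mem Fc.gif

/-- **THE SLOT'S COLOUR MAP IS SET** (at 109583H `lea rdi, [rbp+0x20]`, the joint of "no local map" (`je` at 109545H) and "the deep copy
succeeded" (behind `test r12, r12 ; je` at 10957DH)): `Mid` for the heap `Hc` that holds the copy and the forest `Fc` that does NOT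
own it yet; the array with room, `rbp = sp`; the slot's field agrees with `cm` (`none`: the field is 0; `some`: the copy's two
objects, `MapAt`); and the copy's objects are live in `Hc`, with bases no object of the forest has: `Owns Hc (Map.objs cm ++
Fc.owned)` (`Owns.cons_grew` twice; for `none` it is `ok.owns`). Segment 6 counts the slot: `imgs ++ [⟨cm, none, none⟩]`. -/
structure Slot (H : Heap) (rest : List Obj) (frames : List (Nat × FrameLayout)) (F : Forest) (R : Rd)
    (Hc : Heap) (Fc : Forest) (u₀ e : State) (ret : Word) (v : State) : Prop where
  mid : Mid Gif.L.DGifGetImageDesc.at_109583 H rest frames F R Hc Fc u₀ e ret v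
  /-- the array with room, `sp` in `rbp`, the slot's map in memory and in the heap -/
  slot : ∃ (s : Saved) (cm : Option Map), Fc.saved = some s ∧ s.imgs.length + 1 ≤ s.cap ∧
    (v.reg .rbp).toNat = s.arr + 56 * s.imgs.length ∧
    MapAt cm (SavedImage.ImageDesc.ColorMap v.mem (s.arr + 56 * s.imgs.length)) v.mem ∧
    Owns Hc (Map.objs cm ++ Fc.owned)

/-- **AT THE SHARED EXIT** (at 10949AH `mov eax, ebp`): `At`, the result in `ebp` (zero-extended by the `mov`), and the contract's two
result clauses stated of the present memory and forest (the exit pops: it changes neither). -/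
structure Done (H : Heap) (rest : List Obj) (frames : List (Nat × FrameLayout)) (F : Forest) (R : Rd)
    (Hc : Heap) (Fc : Forest) (u₀ e : State) (ret : Word) (v : State) : Prop where
  at_ : At Gif.L.DGifGetImageDesc.at_10949a H rest frames F R Hc Fc u₀ e ret v
  /-- GIF_OK or GIF_ERROR -/
  res : (v.reg .rbp).toNat % 2 ^ 32 = 1 ∨ (v.reg .rbp).toNat % 2 ^ 32 = 0
  /-- GIF_OK: the LZW field ranges, and ONE MORE counted image without raster and without extension list -/
  ok1 : (v.reg .rbp).toNat % 2 ^ 32 = 1 →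
    LZOK v.mem F.pv ∧ ∃ g : Img, Fc.imgs = F.imgs ++ [g] ∧ g.raster = none ∧ g.ext = none
  /-- GIF_ERROR: the same counted images (the array may have grown: `cap = length + 1`) -/
  ok0 : (v.reg .rbp).toNat % 2 ^ 32 = 0 → Fc.imgs = F.imgs

/-- **Segment 1** (22 instructions; 109460H … 10949AH, 1094A7H … 1094B5H): the four pushes, `sub rsp, 8`, `mov rbx, rdi`;
`rbp = gif->Private` (checked load), IS_READABLE (checked load of `FileState`, `and ebp, 8`; not readable — excluded by `Shape.state`,
or walked —: the checked store of `Error`, `ebp = 0`, to the exit with the entry's heap and forest); `DGifGetImageHeader(gif)` (its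
contract for `H`, `F`, the entry's `frames`: the post gives `H'`, `F'` with `Back2`, `F.SameButIcm F'`); `ebp = eax`; GIF_ERROR: to
the exit (`F'.saved = F.saved`: the same images); GIF_OK: to 1094B5H with `LZOK`. -/
def Seg1 (Lay : Layout) (μ : Microarch) (u₀ : State) : Prop :=
  ∀ (H : Heap) (rest : List Obj) (frames : List (Nat × FrameLayout)) (F : Forest) (R : Rd) (e : State) (ret : Word),
    AtEntry (conv u₀) Gif.L.DGifGetImageDesc.entry (DGifGetImageDesc.spec H rest frames F R).frame ret e →
    (DGifGetImageDesc.spec H rest frames F R).pre e →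
    ReachVia Lay μ WayInv e (fun w =>
      (∃ (H' : Heap) (F' : Forest), Mid Gif.L.DGifGetImageDesc.at_1094b5 H rest frames F R H' F' u₀ e ret w) ∨
      (∃ (H' : Heap) (F' : Forest), Done H rest frames F R H' F' u₀ e ret w))

/-- **Segment 2** (23 instructions; 1094B5H … 109503H, 1095D1H … 1095E6H): the checked load of `gif.SavedImages`; 0: to 1095E6H
(`Fc.saved = none`). Otherwise the array `s` (`ok.shape.saved`; `s.arr` live with size `56 · s.cap`, its capacity from `Heap.Live`):
the checked load of `ImageCount`, `rsi = length + 1` (sign-extended: `length < 2^18` by `Owns.inside`), `rdx = 56`,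
`openbsd_reallocarray` — `ReallocPost` for `m = 56 · (length + 1)`:
  IN PLACE  the heap is `Hc.resize s.arr m` (`Owns.resize_head`), the forest has `cap := length + 1`, no byte of the array moved;
  MOVED     the heap is `(Hc.push m c').release s.arr` (`Owns.push_cons`, `Owns.release`), the forest has `arr := Hc.next`,
            `cap := length + 1`, the counted slots copied (`SavedAt.moved`);
  FAILED    `FailPost`: nothing but stack written; the checked store of `Error`, `ebp` = the low half of the NULL result = 0, to the
            exit with the same heap and forest.
In the first two the checked store of the new pointer to `gif.SavedImages` (`Shape.set_saved`) is INSIDE the segment. -/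
def Seg2 (Lay : Layout) (μ : Microarch) (u₀ : State) : Prop :=
  ∀ (H : Heap) (rest : List Obj) (frames : List (Nat × FrameLayout)) (F : Forest) (R : Rd) (e : State) (ret : Word)
    (Hc : Heap) (Fc : Forest) (v : State),
    Mid Gif.L.DGifGetImageDesc.at_1094b5 H rest frames F R Hc Fc u₀ e ret v →
    ReachVia Lay μ WayInv v (fun w =>
      (∃ (H' : Heap) (F' : Forest), Grown H rest frames F R H' F' u₀ e ret w) ∨
      NoArray H rest frames F R Hc Fc u₀ e ret w ∨
      Done H rest frames F R Hc Fc u₀ e ret w)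

/-- **Segment 3** (12 instructions; 1095E6H … 10961EH): `malloc(56)` (`AllocPost`), `rbp = rax`, the checked store of the result to
`gif.SavedImages` (l.454: also when it is NULL: the field held NULL). Success: the heap is `Hc.push 56 (r16 56)`, the forest has
`saved := some ⟨Hc.next, 1, []⟩` (`GifOK.through_alloc`, `Owns.push_cons`, `SavedAt.first`, `Shape.set_saved`), to 109503H. NULL: the
checked store of `Error`, `ebp` = the low half of the NULL result = 0, to the exit with the same heap and forest. -/
def Seg3 (Lay : Layout) (μ : Microarch) (u₀ : State) : Prop :=
  ∀ (H : Heap) (rest : List Obj) (frames : List (Nat × FrameLayout)) (F : Forest) (R : Rd) (e : State) (ret : Word)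
    (Hc : Heap) (Fc : Forest) (v : State),
    NoArray H rest frames F R Hc Fc u₀ e ret v →
    ReachVia Lay μ WayInv v (fun w =>
      (∃ (H' : Heap) (F' : Forest), Grown H rest frames F R H' F' u₀ e ret w) ∨
      Done H rest frames F R Hc Fc u₀ e ret w)

/-- **Segment 4** (11 instructions; 109503H … 109535H): `rbp = gif.SavedImages` (`= s.arr`), the checked load of `ImageCount`
(`= length`), `rbp = s.arr + 56 · length` (`8·n − n`, times 8); `memcpy(rbp, gif + 40, 32)`: the source lies inside gif (120 bytes), the
destination inside the array (`length + 1 ≤ cap`), two different objects of the forest (`Owns.far`); its footprint `[sp, sp + 32)` is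
a loose `tail` window of the array: `GifOK.sameExcept`. The heap and the forest do not change. -/
def Seg4 (Lay : Layout) (μ : Microarch) (u₀ : State) : Prop :=
  ∀ (H : Heap) (rest : List Obj) (frames : List (Nat × FrameLayout)) (F : Forest) (R : Rd) (e : State) (ret : Word)
    (Hc : Heap) (Fc : Forest) (v : State),
    Grown H rest frames F R Hc Fc u₀ e ret v →
    ReachVia Lay μ WayInv v (AfterCopy H rest frames F R Hc Fc u₀ e ret)

/-- **Segment 5** (24 instructions; 109535H … 109583H, 10961EH … 109638H): the checked load of `gif.Image.ColorMap`; NULL: to 109583H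
with `cm = none` (the copied field is 0). Otherwise the map `mp = Fc.icm`: the checked loads of `mp.obj->Colors` and `->ColorCount`,
`GifMakeMapObject(count, colors)` — THE DEEP COPY: its `src` is the `icm` map's colour array, `3 · count` bytes inside the live
object `(mp.colors, 3 · mp.count)` (`Owns.liveIn`), `count ≤ 256` (`MapAt`) —, the checked store of the result to
`sp->ImageDesc.ColorMap` (a `tail` window; also when it is NULL). A map: to 109583H with `cm = some ⟨rax, colors', count⟩`, the heap
`H'` of `MakeMapPost` (`Hc.Grew H'`), the same forest. NULL: the checked store of `Error`, `ebp = 0`, to the exit — the slot is NOT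
counted: the forest is the same, the heap is `H'`. -/
def Seg5 (Lay : Layout) (μ : Microarch) (u₀ : State) : Prop :=
  ∀ (H : Heap) (rest : List Obj) (frames : List (Nat × FrameLayout)) (F : Forest) (R : Rd) (e : State) (ret : Word)
    (Hc : Heap) (Fc : Forest) (v : State),
    AfterCopy H rest frames F R Hc Fc u₀ e ret v →
    ReachVia Lay μ WayInv v (fun w =>
      (∃ (H' : Heap), Slot H rest frames F R H' Fc u₀ e ret w) ∨
      (∃ (H' : Heap), Done H rest frames F R H' Fc u₀ e ret w))

/-- **Segment 6** (16 instructions; 109583H … 1095D1H): the checked stores `sp->RasterBits = NULL` (`sp + 32`),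
`sp->ExtensionBlockCount = 0` (`sp + 40`), `sp->ExtensionBlocks = NULL` (`sp + 48`) — windows inside the array's capacity —, the
checked load of `ImageCount`, `+ 1`, the store back (`gif + 32`): THE SLOT IS COUNTED. The new forest has
`saved := some { s with imgs := s.imgs ++ [⟨cm, none, none⟩] }` (`Shape.set_saved` with `SavedAt.snoc`, `ImgAt` of the new slot from
the three stores and `MapAt cm`; `Owns` by `Saved.objs_snoc` and `Forest.owned_saved`); the heap is the same; `ebp = 1`. -/
def Seg6 (Lay : Layout) (μ : Microarch) (u₀ : State) : Prop :=
  ∀ (H : Heap) (rest : List Obj) (frames : List (Nat × FrameLayout)) (F : Forest) (R : Rd) (e : State) (ret : Word)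
    (Hc : Heap) (Fc : Forest) (v : State),
    Slot H rest frames F R Hc Fc u₀ e ret v →
    ReachVia Lay μ WayInv v (fun w => ∃ (F' : Forest), Done H rest frames F R Hc F' u₀ e ret w)

/-- **Segment E** (the shared exit, 7 instructions; 10949AH … 1094A7H): `mov eax, ebp`, `add rsp, 8`, four pops, `ret`: the contract's
`Returned`, with `H' = Hc`, `F' = Fc` (`HeapInv.raise` to the caller's stack pointer). -/
def SegE (Lay : Layout) (μ : Microarch) (u₀ : State) : Prop :=
  ∀ (H : Heap) (rest : List Obj) (frames : List (Nat × FrameLayout)) (F : Forest) (R : Rd) (e : State) (ret : Word)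
    (Hc : Heap) (Fc : Forest) (v : State),
    Done H rest frames F R Hc Fc u₀ e ret v →
    ReachVia Lay μ WayInv v (Returned (conv u₀) (DGifGetImageDesc.spec H rest frames F R) e ret)

/-- From the slot with its map set (109583H): segment 6, then the exit. -/
theorem fromSlot {Lay : Layout} {μ : Microarch} {u₀ : State} (h6 : Seg6 Lay μ u₀) (hE : SegE Lay μ u₀)
    (H : Heap) (rest : List Obj) (frames : List (Nat × FrameLayout)) (F : Forest) (R : Rd) (e : State) (ret : Word)
    (Hc : Heap) (Fc : Forest) (w : State) (hw : Slot H rest frames F R Hc Fc u₀ e ret w) :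
    ReachVia Lay μ WayInv w (Returned (conv u₀) (DGifGetImageDesc.spec H rest frames F R) e ret) := by
  refine (h6 H rest frames F R e ret Hc Fc w hw).trans ?_
  intro x hx
  obtain ⟨F', hd⟩ := hx
  exact hE H rest frames F R e ret Hc F' x hd

/-- From the array with room (109503H): segments 4, 5, then 6 or the exit. -/
theorem fromGrown {Lay : Layout} {μ : Microarch} {u₀ : State} (h4 : Seg4 Lay μ u₀) (h5 : Seg5 Lay μ u₀) (h6 : Seg6 Lay μ u₀)
    (hE : SegE Lay μ u₀)
    (H : Heap) (rest : List Obj) (frames : List (Nat × FrameLayout)) (F : Forest) (R : Rd) (e : State) (ret : Word)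
    (Hc : Heap) (Fc : Forest) (w : State) (hw : Grown H rest frames F R Hc Fc u₀ e ret w) :
    ReachVia Lay μ WayInv w (Returned (conv u₀) (DGifGetImageDesc.spec H rest frames F R) e ret) := by
  refine (h4 H rest frames F R e ret Hc Fc w hw).trans ?_
  intro x hx
  refine (h5 H rest frames F R e ret Hc Fc x hx).trans ?_
  intro y hy
  rcases hy with hslot | hdone
  · obtain ⟨H', hs⟩ := hslot
    exact fromSlot h6 hE H rest frames F R e ret H' Fc y hs
  · obtain ⟨H', hd⟩ := hdone
    exact hE H rest frames F R e ret H' Fc y hd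

/-- **The composition of `DGifGetImageDesc`**: the seven segments chain into the function's contract. -/
theorem compose {Lay : Layout} {μ : Microarch} {u₀ : State} (h1 : Seg1 Lay μ u₀) (h2 : Seg2 Lay μ u₀) (h3 : Seg3 Lay μ u₀)
    (h4 : Seg4 Lay μ u₀) (h5 : Seg5 Lay μ u₀) (h6 : Seg6 Lay μ u₀) (hE : SegE Lay μ u₀) :
    ∀ (H : Heap) (rest : List Obj) (frames : List (Nat × FrameLayout)) (F : Forest) (R : Rd),
      Calls Lay μ WayInv (conv u₀) Gif.L.DGifGetImageDesc.entry (DGifGetImageDesc.spec H rest frames F R) := by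
  intro H rest frames F R e ret he hp
  refine (h1 H rest frames F R e ret he hp).trans ?_
  intro v1 hv1
  rcases hv1 with hmid | hdone1
  · obtain ⟨H1, F1, hm⟩ := hmid
    refine (h2 H rest frames F R e ret H1 F1 v1 hm).trans ?_
    intro v2 hv2
    rcases hv2 with hgrown | hnone | hdone2
    · obtain ⟨H2, F2, hg⟩ := hgrown
      exact fromGrown h4 h5 h6 hE H rest frames F R e ret H2 F2 v2 hg
    · refine (h3 H rest frames F R e ret H1 F1 v2 hnone).trans ?_
      intro v3 hv3
      rcases hv3 with hgrown3 | hdone3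
      · obtain ⟨H3, F3, hg⟩ := hgrown3
        exact fromGrown h4 h5 h6 hE H rest frames F R e ret H3 F3 v3 hg
      · exact hE H rest frames F R e ret H1 F1 v3 hdone3
    · exact hE H rest frames F R e ret H1 F1 v2 hdone2
  · obtain ⟨H1, F1, hd⟩ := hdone1
    exact hE H rest frames F R e ret H1 F1 v1 hd

end DGifGetImageDesc

end Gif.Spec
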